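-- pv_equiv track=rewrite | github.com/dv-sharma/pythoncodes | commonelementslist.py | commonelementlist
-- ===== SOURCE A (Python) =====
-- def commonelementlist(list1,list2):
--
--     listfinal=list1+list2
--     listreturn=[]
--     listdict={}
--     for words in listfinal:
--           if words in listdict:
--                 listdict[words]+=1
--           else:
--                 listdict[words]=1
--
--     for key,values in listdict.items():
--           if values>1:
--                 listreturn.append(key)
--     return listreturn
-- ===== SOURCE B (Python) =====
-- def commonelementlist(list1, list2):
--     listfinal = list1 + list2
--     listreturn = []
--     for x in listfinal:
--         if x not in listreturn and listfinal.count(x) > 1: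
--             listreturn.append(x)
--     return listreturn
-- ===== Notes on version B (the rewrite author's own statement) =====
-- stated objective: simpler
-- what changed: Replaced the two-pass counting-dict construction with a single ordered pass that appends x when x is not yet in the result and the combined list's count of x exceeds 1 (repeated list scans instead of a hash table).
import Mathlib
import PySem

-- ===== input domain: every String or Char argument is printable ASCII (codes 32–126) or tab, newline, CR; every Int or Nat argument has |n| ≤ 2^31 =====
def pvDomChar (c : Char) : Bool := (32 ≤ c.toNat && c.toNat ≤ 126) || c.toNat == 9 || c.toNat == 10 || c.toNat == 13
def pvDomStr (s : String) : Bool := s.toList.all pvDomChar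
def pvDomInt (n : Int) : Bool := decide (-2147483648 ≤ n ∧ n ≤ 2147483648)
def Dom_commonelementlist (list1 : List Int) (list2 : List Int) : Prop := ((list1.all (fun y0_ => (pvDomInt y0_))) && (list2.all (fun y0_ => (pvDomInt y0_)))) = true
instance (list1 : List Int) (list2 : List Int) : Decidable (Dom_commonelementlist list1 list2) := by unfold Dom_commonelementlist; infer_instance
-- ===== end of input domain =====

-- B replaces the two-pass counting dict with a single ordered pass that appends x when it is
-- not yet in the result and the combined list contains it more than once (simpler, no dict).

-- ===== PORT A =====
def commonelementlist (list1 : List Int) (list2 : List Int) : List Int :=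
  let listfinal := list1 ++ list2
  let listdict : PySem.Dict Int Int :=
    listfinal.foldl
      (fun d words =>
        if d.contains words then d.insert words (d.getD words 0 + 1)
        else d.insert words 1)
      PySem.Dict.empty
  listdict.items.foldl
    (fun listreturn kv => if kv.2 > 1 then listreturn ++ [kv.1] else listreturn)
    []

-- ===== PORT B =====
def commonelementlist_alt (list1 : List Int) (list2 : List Int) : List Int :=
  let listfinal := list1 ++ list2
  listfinal.foldl
    (fun listreturn x =>
      if x ∉ listreturn ∧ 1 < listfinal.count x then listreturn ++ [x] else listreturn)
    []

-- ===== PRECONDITION & SPEC =====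
def Spec_commonelementlist (list1 : List Int) (list2 : List Int) (out : List Int) : Prop := out = commonelementlist_alt list1 list2
instance (list1 : List Int) (list2 : List Int) (out : List Int) : Decidable (Spec_commonelementlist list1 list2 out) := by unfold Spec_commonelementlist; infer_instance

-- ===== CLAIM (what is proved, stated in full; the proofs are below) =====
def Claim_equal_commonelementlist : Prop := ∀ (list1 : List Int) (list2 : List Int), Dom_commonelementlist list1 list2 → Spec_commonelementlist list1 list2 (commonelementlist list1 list2)

-- ===== LEMMAS AND PROOFS =====

-- A's dict-building loop is exactly the counter loop.
lemma stepA_eq :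
    (fun (d : PySem.Dict Int Int) (w : Int) =>
      if d.contains w then d.insert w (d.getD w 0 + 1) else d.insert w 1)
    = fun d w => d.insert w (d.getD w 0 + 1) := by
  funext d w
  by_cases h : d.contains w
  · simp [h]
  · simp only [Bool.not_eq_true] at h
    simp [h, PySem.Dict.getD_of_not_contains d 0 h]

-- appending-if loop over a list equals a filter
lemma foldl_append_if_count (xs : List Int) :
    ∀ (l acc : List Int),
      l.foldl (fun r k => if (1:Int) < (xs.count k : Int) then r ++ [k] else r) acc
      = acc ++ l.filter (fun k => decide (1 < xs.count k)) := by
  intro l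
  induction l with
  | nil => intro acc; simp
  | cons x t ih =>
    intro acc
    rw [List.foldl_cons]
    by_cases h : 1 < xs.count x
    · rw [if_pos (by exact_mod_cast h), ih, List.filter_cons_of_pos (by simpa using h)]
      simp
    · rw [if_neg (by exact_mod_cast h), ih, List.filter_cons_of_neg (by simpa using h)]

-- A's result is the ordered dedup of the combined list filtered by multiplicity > 1.
lemma A_char (list1 list2 : List Int) :
    commonelementlist list1 list2
    = (PySem.List.dedup (list1 ++ list2)).filter
        (fun k => decide (1 < (list1 ++ list2).count k)) := by
  unfold commonelementlist
  simp only [stepA_eq, PySem.Dict.foldl_insert_getD_add_one_eq_counter,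
    PySem.Dict.items_counter, List.foldl_map]
  rw [foldl_append_if_count (list1 ++ list2) (PySem.Set.ofList (list1 ++ list2)) []]
  simp [PySem.List.dedup_eq_ofList]

lemma dedup_append_singleton (s : List Int) (x : Int) :
    PySem.List.dedup (s ++ [x])
    = if x ∈ s then PySem.List.dedup s else PySem.List.dedup s ++ [x] := by
  have h1 : PySem.List.dedup (s ++ [x]) = PySem.Set.add (PySem.List.dedup s) x := by
    simp [PySem.List.dedup_eq_ofList, PySem.Set.ofList]
  rw [h1]
  by_cases h : x ∈ s
  · simp [PySem.Set.add, PySem.Set.contains, h]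
  · simp [PySem.Set.add, PySem.Set.contains, h]

-- B's one-pass loop computes the same filtered dedup.
lemma foldl_mem_filter (p : Int → Prop) [DecidablePred p] :
    ∀ (l s : List Int),
      List.foldl (fun r x => if x ∉ r ∧ p x then r ++ [x] else r)
        ((PySem.List.dedup s).filter (fun x => decide (p x))) l
      = (PySem.List.dedup (s ++ l)).filter (fun x => decide (p x)) := by
  intro l
  induction l with
  | nil => intro s; simp
  | cons x t ih =>
    intro s
    have hmem : x ∈ (PySem.List.dedup s).filter (fun x => decide (p x)) ↔ (x ∈ s ∧ p x) := by
      simp [List.mem_filter]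
    have hstep :
        (if x ∉ (PySem.List.dedup s).filter (fun x => decide (p x)) ∧ p x
         then (PySem.List.dedup s).filter (fun x => decide (p x)) ++ [x]
         else (PySem.List.dedup s).filter (fun x => decide (p x)))
        = (PySem.List.dedup (s ++ [x])).filter (fun x => decide (p x)) := by
      rw [dedup_append_singleton]
      by_cases hs : x ∈ s
      · have : ¬ (x ∉ (PySem.List.dedup s).filter (fun x => decide (p x)) ∧ p x) := by
          intro ⟨hnm, hp⟩; exact hnm (hmem.mpr ⟨hs, hp⟩)
        simp [hs]
      · have hnm : x ∉ (PySem.List.dedup s).filter (fun x => decide (p x)) := by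
          intro hx; exact hs (hmem.mp hx).1
        by_cases hp : p x
        · simp [hs, hp]
        · simp [hs, hp]
    rw [List.foldl_cons, hstep, ih (s ++ [x]), List.append_assoc]
    rfl

lemma B_char (list1 list2 : List Int) :
    commonelementlist_alt list1 list2
    = (PySem.List.dedup (list1 ++ list2)).filter
        (fun k => decide (1 < (list1 ++ list2).count k)) := by
  unfold commonelementlist_alt
  have := foldl_mem_filter (fun x => 1 < (list1 ++ list2).count x) (list1 ++ list2) []
  simpa using this

-- ===== VERDICT (by name: the statement is the Claim_ definition above) =====
theorem commonelementlist_spec : Claim_equal_commonelementlist := by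
  intro list1 list2 _
  unfold Spec_commonelementlist
  rw [A_char, B_char]
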